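-- pv_equiv track=rewrite | github.com/llbridge/based-on-neurokit2 | EEG.py | filter_stress_windows
-- ===== SOURCE A (Python) =====
-- def filter_stress_windows(is_stress, min_duration=1):
--     """
--     Filters high-stress windows, ensuring the duration exceeds the minimum threshold.
--     """
--     filtered_stress = [False] * len(is_stress)
--     count = 0
--     for i in range(len(is_stress)):
--         if is_stress[i]:
--             count += 1
--         else:
--             if count >= min_duration:
--                 for j in range(i - count, i):
--                     filtered_stress[j] = True
--             count = 0
--     if count >= min_duration:
--         for j in range(len(is_stress) - count, len(is_stress)):
--             filtered_stress[j] = True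
--     return filtered_stress
-- ===== SOURCE B (Python) =====
-- def filter_stress_windows(is_stress, min_duration=1):
--     out = []
--     n = len(is_stress)
--     i = 0
--     while i < n:
--         x = bool(is_stress[i])
--         j = i
--         while j < n and bool(is_stress[j]) == x:
--             j += 1
--         out.extend([x and (j - i) >= min_duration] * (j - i))
--         i = j
--     return out
-- ===== Notes on version B (the rewrite author's own statement) =====
-- stated objective: alternative
-- what changed: A scans element-by-element with a counter, back-patching a pre-allocated False array when a qualifying run ends (plus a duplicated post-loop flush); B scans run-at-a-time with an inner while that finds each run's end, emitting the whole run's verdict at once with no counter, no back-patching and no trailing flush.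
import Mathlib
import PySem

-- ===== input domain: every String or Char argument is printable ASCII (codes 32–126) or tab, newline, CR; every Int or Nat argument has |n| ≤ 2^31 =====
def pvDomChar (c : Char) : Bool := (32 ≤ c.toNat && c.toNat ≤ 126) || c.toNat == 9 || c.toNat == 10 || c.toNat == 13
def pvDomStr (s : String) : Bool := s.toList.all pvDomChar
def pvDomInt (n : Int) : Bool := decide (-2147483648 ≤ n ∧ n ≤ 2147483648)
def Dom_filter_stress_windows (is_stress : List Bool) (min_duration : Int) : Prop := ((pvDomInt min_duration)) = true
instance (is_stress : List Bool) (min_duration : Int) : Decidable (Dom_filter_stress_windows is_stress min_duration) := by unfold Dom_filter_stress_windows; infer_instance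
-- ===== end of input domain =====

-- B replaces A's per-element counter scan (with its trailing post-loop flush) by a run-at-a-time
-- scan that emits each whole run's verdict in one step (objective: alternative decomposition).

-- ===== PORT A =====
-- 'for j in range(a, b): filtered[j] = True'
def pvMarkRange (f : List Bool) (a b : Int) : List Bool :=
  (PySem.List.pyRange a b 1).foldl (fun f j => PySem.List.pySetD f j true) f

-- the body of A's main for-loop; state = (filtered_stress, count)
def pvBodyA (xs : List Bool) (m : Int) (st : List Bool × Int) (i : Int) : List Bool × Int :=
  if PySem.List.pyGetD xs i false then (st.1, st.2 + 1)
  else if st.2 ≥ m then (pvMarkRange st.1 (i - st.2) i, 0)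
  else (st.1, 0)

def filter_stress_windows (is_stress : List Bool) (min_duration : Int) : List Bool :=
  let n : Int := PySem.List.len is_stress
  let st := (PySem.List.pyRange 0 n 1).foldl (pvBodyA is_stress min_duration)
              (List.replicate is_stress.length false, 0)
  if st.2 ≥ min_duration then pvMarkRange st.1 (n - st.2) n else st.1

-- ===== PORT B =====
-- inner while loop: advance j while xs[j] == x
def pvRunEnd (xs : List Bool) (x : Bool) (j : Nat) : Nat :=
  if h : j < xs.length then
    if xs[j] == x then pvRunEnd xs x (j + 1) else j
  else j
termination_by xs.length - j
decreasing_by exact Nat.sub_succ_lt_self xs.length j h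

theorem pvRunEnd_ge (xs : List Bool) (x : Bool) (j : Nat) : j ≤ pvRunEnd xs x j := by
  unfold pvRunEnd
  split
  · split
    · exact le_trans (Nat.le_succ j) (pvRunEnd_ge xs x (j + 1))
    · exact le_refl j
  · exact le_refl j
termination_by xs.length - j

theorem pvRunEnd_gt (xs : List Bool) (i : Nat) (h : i < xs.length) :
    i < pvRunEnd xs xs[i] i := by
  unfold pvRunEnd
  simp only [h, dif_pos, BEq.rfl, if_pos]
  exact lt_of_lt_of_le (Nat.lt_succ_self i) (pvRunEnd_ge xs xs[i] (i + 1))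

-- outer while loop of B, emitting one run per step
def pvAltLoop (xs : List Bool) (m : Int) (i : Nat) : List Bool :=
  if h : i < xs.length then
    let x := xs[i]
    let j := pvRunEnd xs x i
    List.replicate (j - i) (x && decide (((j : Int) - (i : Int)) ≥ m)) ++ pvAltLoop xs m j
  else []
termination_by xs.length - i
decreasing_by exact Nat.sub_lt_sub_left h (pvRunEnd_gt xs i h)

def filter_stress_windows_alt (is_stress : List Bool) (min_duration : Int) : List Bool :=
  pvAltLoop is_stress min_duration 0

-- ===== PRECONDITION & SPEC =====
def Spec_filter_stress_windows (is_stress : List Bool) (min_duration : Int) (out : List Bool) : Prop := out = filter_stress_windows_alt is_stress min_duration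
instance (is_stress : List Bool) (min_duration : Int) (out : List Bool) : Decidable (Spec_filter_stress_windows is_stress min_duration out) := by unfold Spec_filter_stress_windows; infer_instance

-- ===== CLAIM (what is proved, stated in full; the proofs are below) =====
def Claim_equal_filter_stress_windows : Prop := ∀ (is_stress : List Bool) (min_duration : Int), Dom_filter_stress_windows is_stress min_duration → Spec_filter_stress_windows is_stress min_duration (filter_stress_windows is_stress min_duration)

-- ===== LEMMAS AND PROOFS =====

-- element-at-a-time description of A: pending true-run of length c, rest of input
def pvARec (m : Int) : List Bool → Nat → List Bool
  | [], c => List.replicate c (decide ((c : Int) ≥ m))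
  | true :: t, c => pvARec m t (c + 1)
  | false :: t, c => List.replicate c (decide ((c : Int) ≥ m)) ++ false :: pvARec m t 0

-- run-at-a-time description of B
def pvRuns (m : Int) : List Bool → List Bool
  | [] => []
  | x :: t =>
    let k := (t.takeWhile (· == x)).length + 1
    List.replicate k (x && decide ((k : Int) ≥ m)) ++ pvRuns m (t.dropWhile (· == x))
termination_by l => l.length
decreasing_by
  simp only [List.length_cons]
  exact Nat.lt_succ_of_le (t.length_dropWhile_le (· == x))

theorem pvMarkRange_spec (c : Nat) (done tail : List Bool) (hc : c ≤ tail.length) :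
    pvMarkRange (done ++ tail) (done.length : Int) ((done.length : Int) + c) =
      done ++ List.replicate c true ++ tail.drop c := by
  induction c generalizing done tail with
  | zero =>
    unfold pvMarkRange
    rw [PySem.List.pyRange_one_eq_nil (by omega)]
    simp
  | succ c ih =>
    match tail, hc with
    | t0 :: tail', hcc =>
      unfold pvMarkRange
      rw [PySem.List.pyRange_one_cons (by push_cast; omega)]
      simp only [List.foldl_cons, PySem.List.pySetD_natCast]
      rw [List.set_append_right _ _ (le_refl _), Nat.sub_self]
      have h1 : (done ++ (t0 :: tail').set 0 true) = (done ++ [true]) ++ tail' := by simp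
      rw [h1]
      have h2 : ((done.length : Int) + 1) = (((done ++ [true]).length : Int)) := by simp
      have h3 : ((done.length : Int) + (c + 1 : Nat)) = ((done ++ [true]).length : Int) + c := by
        have hl : (done ++ [true]).length = done.length + 1 := by simp
        rw [hl]; push_cast; ring
      rw [h3, h2]
      have := ih (done ++ [true]) tail' (by simp only [List.length_cons] at hcc; omega)
      unfold pvMarkRange at this
      rw [this]
      simp [List.replicate_succ]

theorem pvMain (m : Int) (suf : List Bool) : ∀ (c : Nat) (done junk : List Bool) (a n cnt : Int) (f : List Bool),
    junk.length = done.length + c →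
    a = (junk.length : Int) →
    n = (junk.length : Int) + suf.length →
    cnt = (c : Int) →
    f = done ++ List.replicate (c + suf.length) false →
    (let st := (PySem.List.pyRange a n 1).foldl (pvBodyA (junk ++ suf) m) (f, cnt)
     if st.2 ≥ m then pvMarkRange st.1 (n - st.2) n else st.1) = done ++ pvARec m suf c := by
  induction suf with
  | nil =>
    intro c done junk a n cnt f hj ha hn hcnt hf
    simp only [List.length_nil, Nat.cast_zero, add_zero] at hn
    rw [ha, hn, PySem.List.pyRange_one_eq_nil (le_refl _)]
    simp only [List.foldl_nil, pvARec]
    rw [hcnt, hf]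
    simp only [List.length_nil, Nat.add_zero]
    split_ifs with h
    · have h1 : (junk.length : Int) - (c : Int) = (done.length : Int) := by rw [hj]; push_cast; ring
      have h2 : (junk.length : Int) = (done.length : Int) + (c : Int) := by rw [hj]; push_cast; ring
      rw [h1, h2]
      have h3 : ((c : Int)) = ((c : Nat) : Int) := rfl
      rw [show ((done.length : Int) + (c : Int)) = ((done.length : Int) + (c : Nat)) from rfl]
      rw [pvMarkRange_spec c done (List.replicate c false) (by simp)]
      simp [decide_eq_true h]
    · simp [decide_eq_false h]
  | cons b rest ih =>
    intro c done junk a n cnt f hj ha hn hcnt hf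
    have hlen : ((b :: rest).length : Int) = (rest.length : Int) + 1 := by push_cast [List.length_cons]; ring
    have hab : a < n := by rw [ha, hn, hlen]; have : (0:Int) ≤ (rest.length : Int) := by positivity
                           omega
    rw [PySem.List.pyRange_one_cons hab]
    simp only [List.foldl_cons]
    have hget : PySem.List.pyGetD (junk ++ b :: rest) a false = b := by
      rw [ha, PySem.List.pyGetD_natCast]
      simp [List.getD, List.getElem?_append_right (le_refl junk.length)]
    have hxs : junk ++ b :: rest = (junk ++ [b]) ++ rest := by simp
    cases b with
    | true =>
      simp only [pvBodyA, hget, if_pos]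
      rw [hxs]
      have := ih (c + 1) done (junk ++ [true]) (a + 1) n (cnt + 1) f
        (by simp only [List.length_append, List.length_cons, List.length_nil, List.length_replicate]; omega)
        (by rw [ha]; simp only [List.length_append, List.length_cons, List.length_nil]; push_cast; ring)
        (by rw [hn]; simp only [List.length_append, List.length_cons, List.length_nil]; push_cast; ring)
        (by rw [hcnt]; push_cast; ring)
        (by rw [hf, show c + (true :: rest).length = (c + 1) + rest.length from by
              simp only [List.length_cons]; omega])
      simpa [pvARec] using this
    | false =>
      simp only [pvBodyA, hget, Bool.false_eq_true, if_false]
      by_cases h : cnt ≥ m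
      · rw [if_pos h]
        have hcm : ((c : Int)) ≥ m := by rw [hcnt] at h; exact h
        have h1 : a - cnt = (done.length : Int) := by rw [ha, hcnt, hj]; push_cast; ring
        have h2 : a = (done.length : Int) + (c : Nat) := by rw [ha, hj]; push_cast; ring
        rw [hf, h1, h2, pvMarkRange_spec c done (List.replicate (c + (false :: rest).length) false) (by simp)]
        have h3 : (List.replicate (c + (false :: rest).length) false).drop c
            = List.replicate (rest.length + 1) false := by
          rw [List.drop_replicate]; congr 1; simp
        have hres : done ++ List.replicate c true ++ List.replicate (rest.length + 1) false
            = (done ++ List.replicate c true ++ [false]) ++ List.replicate (0 + rest.length) false := by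
          simp [List.replicate_succ]
        rw [h3, hres, hxs]
        have hrhs : done ++ pvARec m (false :: rest) c
            = (done ++ List.replicate c true ++ [false]) ++ pvARec m rest 0 := by
          rw [pvARec]
          simp [decide_eq_true hcm]
        rw [hrhs]
        exact ih 0 (done ++ List.replicate c true ++ [false]) (junk ++ [false])
          ((done.length : Int) + (c : Nat) + 1) n 0
          ((done ++ List.replicate c true ++ [false]) ++ List.replicate (0 + rest.length) false)
          (by simp only [List.length_append, List.length_cons, List.length_nil, List.length_replicate]; omega)
          (by simp only [List.length_append, List.length_cons, List.length_nil,
                List.length_replicate, hj]; push_cast; ring)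
          (by rw [hn]; simp only [List.length_append, List.length_cons, List.length_nil,
                List.length_replicate, hj]; push_cast; ring)
          (by simp) rfl
      · rw [if_neg h]
        have hcm : ¬ ((c : Int)) ≥ m := by rw [hcnt] at h; exact h
        have hf' : f = (done ++ List.replicate c false ++ [false]) ++ List.replicate (0 + rest.length) false := by
          rw [hf]
          rw [show c + (false :: rest).length = c + 1 + rest.length by simp only [List.length_cons]; omega]
          rw [List.replicate_add, List.replicate_add]
          simp
        have hrhs : done ++ pvARec m (false :: rest) c
            = (done ++ List.replicate c false ++ [false]) ++ pvARec m rest 0 := by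
          rw [pvARec]
          simp [decide_eq_false hcm]
        rw [hf', hrhs, hxs, ha, hj]
        exact ih 0 (done ++ List.replicate c false ++ [false]) (junk ++ [false])
          ((done.length : Int) + (c : Nat) + 1) n 0
          ((done ++ List.replicate c false ++ [false]) ++ List.replicate (0 + rest.length) false)
          (by simp only [List.length_append, List.length_cons, List.length_nil, List.length_replicate]; omega)
          (by simp only [List.length_append, List.length_cons, List.length_nil,
                List.length_replicate, hj]; push_cast; ring)
          (by rw [hn]; simp only [List.length_append, List.length_cons, List.length_nil,
                List.length_replicate, hj]; push_cast; ring)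
          (by simp) rfl

theorem pvA_eq_aRec (is_stress : List Bool) (m : Int) :
    filter_stress_windows is_stress m = pvARec m is_stress 0 := by
  unfold filter_stress_windows
  have := pvMain m is_stress 0 [] [] 0 (PySem.List.len is_stress) 0
    (List.replicate is_stress.length false)
    (by simp) (by simp) (by simp [PySem.List.len_eq]) (by simp) (by simp)
  simpa using this

-- dropWhile is drop of the takeWhile length
theorem pv_dw_eq_drop (p : Bool → Bool) (l : List Bool) :
    l.dropWhile p = l.drop (l.takeWhile p).length := by
  induction l with
  | nil => rfl
  | cons a t ih =>
    by_cases h : p a <;> simp [List.dropWhile_cons, List.takeWhile_cons, h, ih]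

theorem pv_tw_rep_true (k : Nat) (t : List Bool) :
    (List.replicate k true ++ t).takeWhile (· == true) = List.replicate k true ++ t.takeWhile (· == true) := by
  induction k with
  | zero => simp
  | succ k ih => simp [List.replicate_succ, List.takeWhile_cons, ih]

theorem pv_dw_rep_true (k : Nat) (t : List Bool) :
    (List.replicate k true ++ t).dropWhile (· == true) = t.dropWhile (· == true) := by
  induction k with
  | zero => simp
  | succ k ih => simp [List.replicate_succ, List.dropWhile_cons, ih]

theorem pv_dw_of_tw_nil (p : Bool → Bool) (t : List Bool) (ht : t.takeWhile p = []) :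
    t.dropWhile p = t := by
  rw [pv_dw_eq_drop, ht]
  simp

theorem pvRuns_false_cons (m : Int) (d : List Bool) :
    pvRuns m (false :: d) = false :: pvRuns m d := by
  cases d with
  | nil => simp [pvRuns]
  | cons b d' =>
    cases b with
    | true => simp [pvRuns, List.takeWhile_cons, List.dropWhile_cons, List.replicate_succ]
    | false => simp [pvRuns, List.takeWhile_cons, List.dropWhile_cons, List.replicate_succ]

theorem pvRuns_rep_true (m : Int) (c : Nat) (t : List Bool) (ht : t.takeWhile (· == true) = []) :
    pvRuns m (List.replicate c true ++ t) = List.replicate c (decide ((c : Int) ≥ m)) ++ pvRuns m t := by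
  cases c with
  | zero => simp
  | succ c' =>
    rw [List.replicate_succ, List.cons_append, pvRuns]
    simp only [pv_tw_rep_true, ht, pv_dw_rep_true, pv_dw_of_tw_nil _ _ ht,
      List.append_nil, List.length_replicate, Bool.true_and]

theorem pvARec_eq_runs_aux (m : Int) : ∀ (xs : List Bool) (c : Nat),
    pvARec m xs c = pvRuns m (List.replicate c true ++ xs)
  | [], c => by
    rw [pvRuns_rep_true m c [] rfl]
    simp [pvARec, pvRuns]
  | true :: t, c => by
    have h : List.replicate c true ++ true :: t = List.replicate (c + 1) true ++ t := by
      simp [List.replicate_succ']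
    rw [pvARec, pvARec_eq_runs_aux m t (c + 1), h]
  | false :: t, c => by
    rw [pvARec, pvARec_eq_runs_aux m t 0, pvRuns_rep_true m c (false :: t) (by simp [List.takeWhile_cons])]
    simp [pvRuns_false_cons]

theorem pvARec_eq_runs (m : Int) (xs : List Bool) :
    pvARec m xs 0 = pvRuns m xs := by
  simpa using pvARec_eq_runs_aux m xs 0

theorem pvRunEnd_eq (xs : List Bool) (x : Bool) (j : Nat) :
    pvRunEnd xs x j = j + ((xs.drop j).takeWhile (· == x)).length := by
  unfold pvRunEnd
  split
  · rename_i h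
    rw [List.drop_eq_getElem_cons h]
    split
    · rename_i hx
      rw [pvRunEnd_eq xs x (j + 1), List.takeWhile_cons, if_pos hx, List.length_cons]
      omega
    · rename_i hx
      rw [List.takeWhile_cons, if_neg hx, List.length_nil]
      omega
  · rename_i h
    rw [List.drop_of_length_le (by omega)]
    simp
termination_by xs.length - j

theorem pvAltLoop_eq_runs (m : Int) (xs : List Bool) (i : Nat) :
    pvAltLoop xs m i = pvRuns m (xs.drop i) := by
  unfold pvAltLoop
  split
  · rename_i h
    rw [List.drop_eq_getElem_cons h, pvRuns]
    have hre : pvRunEnd xs xs[i] i = i + (((xs.drop i).takeWhile (· == xs[i])).length) :=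
      pvRunEnd_eq xs xs[i] i
    have htw : (xs.drop i).takeWhile (· == xs[i])
        = xs[i] :: (xs.drop (i + 1)).takeWhile (· == xs[i]) := by
      rw [List.drop_eq_getElem_cons h, List.takeWhile_cons,
        if_pos (show (xs[i] == xs[i]) = true by simp)]
    have hk : pvRunEnd xs xs[i] i = i + (((xs.drop (i + 1)).takeWhile (· == xs[i])).length + 1) := by
      rw [hre, htw, List.length_cons]
    simp only [hk]
    have h1 : i + (((xs.drop (i + 1)).takeWhile (· == xs[i])).length + 1) - i
        = ((xs.drop (i + 1)).takeWhile (· == xs[i])).length + 1 := by omega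
    have h2 : ((i + (((xs.drop (i + 1)).takeWhile (· == xs[i])).length + 1) : Nat) : Int) - (i : Int)
        = ((((xs.drop (i + 1)).takeWhile (· == xs[i])).length + 1 : Nat) : Int) := by push_cast; ring
    have hrec := pvAltLoop_eq_runs m xs (i + (((xs.drop (i + 1)).takeWhile (· == xs[i])).length + 1))
    have hdrop : xs.drop (i + (((xs.drop (i + 1)).takeWhile (· == xs[i])).length + 1))
        = (xs.drop (i + 1)).dropWhile (· == xs[i]) := by
      rw [pv_dw_eq_drop, List.drop_drop]
      congr 1
      omega
    rw [h1, h2, hrec, hdrop]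
  · rename_i h
    rw [List.drop_of_length_le (by omega)]
    simp [pvRuns]
termination_by xs.length - i

-- ===== VERDICT (by name: the statement is the Claim_ definition above) =====
theorem filter_stress_windows_spec : Claim_equal_filter_stress_windows := by
  intro xs m _
  unfold Spec_filter_stress_windows filter_stress_windows_alt
  rw [pvA_eq_aRec, pvARec_eq_runs, pvAltLoop_eq_runs, List.drop_zero]
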